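-- pv_equiv track=rewrite | github.com/HoverHell/python_data_logging | data_logging/formatters.py | reorder_data
-- ===== SOURCE A (Python) =====
-- from collections import OrderedDict
--
-- def reorder_data(items, ordered_first, ordered_last):
--     data_dict_tmp = OrderedDict(items)
--
--     def make_part(lst):
--         # NOTE: mutates the `data_dict_tmp`
--         result = []
--         if not lst:
--             return result
--         for field in lst:
--             try:
--                 value = data_dict_tmp.pop(field)
--             except KeyError:
--                 continue
--             result.append((field, value))
--         return result
--
--     data_start = make_part(ordered_first)
--     data_end = make_part(ordered_last)
--     data = data_start + list(data_dict_tmp.items()) + data_end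
--     return data
-- ===== SOURCE B (Python) =====
-- def reorder_data(items, ordered_first, ordered_last):
--     data = dict(items)
--     first_keys = [f for f in dict.fromkeys(ordered_first) if f in data]
--     taken = set(first_keys)
--     last_keys = [f for f in dict.fromkeys(ordered_last) if f in data and f not in taken]
--     taken.update(last_keys)
--     mid_keys = [k for k in data if k not in taken]
--     return [(k, data[k]) for k in first_keys + mid_keys + last_keys]
-- ===== Notes on version B (the rewrite author's own statement) =====
-- stated objective: simpler
-- what changed: B replaces A's two mutating OrderedDict.pop loops with a pure pipeline: it first computes the three key orders (dedup-then-filter for the first/last lists, a taken-set filter over the dict's keys for the middle) and then emits all pairs in one final mapping pass; a timing run also measured it ~2.7x faster (plain dict and set membership instead of repeated OrderedDict.pop mutation).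
import Mathlib
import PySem

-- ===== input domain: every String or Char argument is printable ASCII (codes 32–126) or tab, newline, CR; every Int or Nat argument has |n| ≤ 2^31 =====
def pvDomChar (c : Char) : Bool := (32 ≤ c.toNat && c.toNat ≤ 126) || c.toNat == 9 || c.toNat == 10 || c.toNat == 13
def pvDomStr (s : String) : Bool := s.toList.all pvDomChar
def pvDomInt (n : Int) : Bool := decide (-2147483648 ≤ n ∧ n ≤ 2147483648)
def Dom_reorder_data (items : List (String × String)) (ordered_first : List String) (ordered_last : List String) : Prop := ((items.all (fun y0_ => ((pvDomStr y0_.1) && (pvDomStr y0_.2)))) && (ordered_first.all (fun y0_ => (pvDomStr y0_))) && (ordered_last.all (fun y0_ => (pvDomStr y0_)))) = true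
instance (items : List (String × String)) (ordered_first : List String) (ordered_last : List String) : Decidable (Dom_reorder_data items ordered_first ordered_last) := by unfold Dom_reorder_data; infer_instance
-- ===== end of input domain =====

-- B replaces A's mutating OrderedDict.pop loops with a pure pipeline (key lists first, one
-- final mapping pass); objective: simpler. Return values proved equal on all inputs.


-- ===== PORT A =====
-- loop body of make_part: try pop → append (field, value); KeyError → continue
def pvStep (st : List (String × String) × PySem.Dict String String) (f : String) :
    List (String × String) × PySem.Dict String String :=
  match st.2.pop? f with
  | none => st
  | some (v, d') => (st.1 ++ [(f, v)], d')

-- make_part(lst): returns (result, the mutated dict)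
def pvMakePart (d : PySem.Dict String String) (lst : List String) :
    List (String × String) × PySem.Dict String String :=
  if lst.isEmpty then ([], d) else lst.foldl pvStep ([], d)

def reorder_data (items : List (String × String)) (ordered_first : List String) (ordered_last : List String) : List (String × String) :=
  let d := PySem.Dict.ofList items
  let s := pvMakePart d ordered_first
  let e := pvMakePart s.2 ordered_last
  s.1 ++ e.2.items ++ e.1

-- ===== PORT B =====
def reorder_data_alt (items : List (String × String)) (ordered_first : List String) (ordered_last : List String) : List (String × String) :=
  let data := PySem.Dict.ofList items
  let firstKeys := (PySem.List.dedup ordered_first).filter (fun f => data.contains f)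
  let taken := PySem.Set.ofList firstKeys
  let lastKeys := (PySem.List.dedup ordered_last).filter (fun f => data.contains f && !(PySem.Set.contains taken f))
  let taken2 := PySem.Set.update taken lastKeys
  let midKeys := data.keys.filter (fun k => !(PySem.Set.contains taken2 k))
  -- data[k]: every listed key is in data, so getD's default is never used
  (firstKeys ++ midKeys ++ lastKeys).map (fun k => (k, data.getD k ""))

-- ===== PRECONDITION & SPEC =====
def Spec_reorder_data (items : List (String × String)) (ordered_first : List String) (ordered_last : List String) (out : List (String × String)) : Prop := out = reorder_data_alt items ordered_first ordered_last
instance (items : List (String × String)) (ordered_first : List String) (ordered_last : List String) (out : List (String × String)) : Decidable (Spec_reorder_data items ordered_first ordered_last out) := by unfold Spec_reorder_data; infer_instance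

-- ===== CLAIM (what is proved, stated in full; the proofs are below) =====
def Claim_equal_reorder_data : Prop := ∀ (items : List (String × String)) (ordered_first : List String) (ordered_last : List String), Dom_reorder_data items ordered_first ordered_last → Spec_reorder_data items ordered_first ordered_last (reorder_data items ordered_first ordered_last)

-- ===== LEMMAS AND PROOFS =====

-- the keys A's make_part pops, in pop order (f kept iff still present; then erased)
def selKeys (d : PySem.Dict String String) : List String → List String
  | [] => []
  | f :: fs => if d.contains f then f :: selKeys (d.erase f) fs else selKeys d fs

def eraseAll (d : PySem.Dict String String) (ks : List String) : PySem.Dict String String :=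
  ks.foldl PySem.Dict.erase d

theorem pvMakePart_eq_foldl (d : PySem.Dict String String) (lst : List String) :
    pvMakePart d lst = lst.foldl pvStep ([], d) := by
  cases lst <;> simp [pvMakePart]

theorem find?_filter_ne (l : List (String × String)) (f x : String) (h : x ≠ f) :
    (l.filter (fun p => !(p.1 == f))).find? (fun p => p.1 == x) = l.find? (fun p => p.1 == x) := by
  induction l with
  | nil => rfl
  | cons p l ih =>
    have hfx : (f == x) = false := by simpa using Ne.symm h
    by_cases hpf : p.1 = f
    · simp [hpf, hfx, ih]
    · by_cases hpx : p.1 = x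
      · simp [hpx, h]
      · simp [hpf, hpx, ih]

theorem get?_erase (d : PySem.Dict String String) (f x : String) :
    (d.erase f).get? x = if x = f then none else d.get? x := by
  by_cases h : x = f
  · subst h
    simp only [PySem.Dict.erase, PySem.Dict.get?]
    have : (d.items.filter (fun p => !(p.1 == x))).find? (fun p => p.1 == x) = none := by
      rw [List.find?_eq_none]
      intro p hp
      have := (List.mem_filter.mp hp).2
      simpa using this
    simp [this]
  · simp only [PySem.Dict.erase, PySem.Dict.get?, if_neg h]
    rw [find?_filter_ne _ _ _ h]

theorem any_filter_key (l : List (String × String)) (f x : String) :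
    ((l.filter (fun p => !(p.1 == f))).any (fun p => p.1 == x)) =
      ((l.any (fun p => p.1 == x)) && !(x == f)) := by
  induction l with
  | nil => simp
  | cons p l ih =>
    by_cases hpf : p.1 = f
    · by_cases hpx : p.1 = x
      · have hxf : x = f := by rw [← hpx, hpf]
        subst hxf
        simp [hpf, ih]
      · have hfx : (f == x) = false := by
          simpa using fun he => hpx (by rw [hpf, he])
        simp [hpf, hfx, ih]
    · by_cases hpx : p.1 = x
      · have hxf : (x == f) = false := by
          simpa using fun he => hpf (by rw [hpx, he])
        simp [hpx, hxf]
      · have ha : (p.1 == x) = false := by simpa using hpx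
        simp [hpf, ha, ih]

theorem contains_erase (d : PySem.Dict String String) (f x : String) :
    (d.erase f).contains x = (d.contains x && !(x == f)) := by
  simp only [PySem.Dict.erase, PySem.Dict.contains]
  exact any_filter_key d.items f x

theorem getD_erase_of_ne (d : PySem.Dict String String) (f x : String) (h : x ≠ f) :
    (d.erase f).getD x "" = d.getD x "" := by
  rw [PySem.Dict.getD_eq_get?_getD, PySem.Dict.getD_eq_get?_getD, get?_erase, if_neg h]

theorem items_erase (d : PySem.Dict String String) (f : String) :
    (d.erase f).items = d.items.filter (fun p => !(p.1 == f)) := rfl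

theorem contains_eraseAll (ks : List String) (d : PySem.Dict String String) (x : String) :
    (eraseAll d ks).contains x = (d.contains x && !(ks.contains x)) := by
  induction ks generalizing d with
  | nil => simp [eraseAll]
  | cons k ks ih =>
    show (eraseAll (d.erase k) ks).contains x = _
    rw [ih, contains_erase]
    by_cases h : x = k
    · simp [h]
    · have : (x == k) = false := by simpa using h
      simp [this, h]

theorem getD_eraseAll_of_not_mem (ks : List String) (d : PySem.Dict String String) (x : String)
    (h : x ∉ ks) : (eraseAll d ks).getD x "" = d.getD x "" := by
  induction ks generalizing d with
  | nil => rfl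
  | cons k ks ih =>
    show (eraseAll (d.erase k) ks).getD x "" = _
    rw [ih _ (fun hm => h (List.mem_cons_of_mem _ hm)),
        getD_erase_of_ne _ _ _ (fun he => h (by simp [he]))]

theorem items_eraseAll (ks : List String) (d : PySem.Dict String String) :
    (eraseAll d ks).items = d.items.filter (fun p => !(ks.contains p.1)) := by
  induction ks generalizing d with
  | nil => simp [eraseAll]
  | cons k ks ih =>
    show (eraseAll (d.erase k) ks).items = _
    rw [ih, items_erase, List.filter_filter]
    apply List.filter_congr
    intro p _
    by_cases h : p.1 = k <;> simp [h]

theorem mem_selKeys_contains (lst : List String) (d : PySem.Dict String String) (x : String)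
    (h : x ∈ selKeys d lst) : d.contains x = true := by
  induction lst generalizing d with
  | nil => simp [selKeys] at h
  | cons f fs ih =>
    by_cases hc : d.contains f = true
    · rw [selKeys, if_pos hc] at h
      rcases List.mem_cons.mp h with h | h
      · exact h ▸ hc
      · have := ih _ h
        rw [contains_erase] at this
        simp at this
        exact this.1
    · rw [selKeys, if_neg hc] at h
      exact ih _ h

theorem eraseAll_cons (d : PySem.Dict String String) (k : String) (ks : List String) :
    eraseAll d (k :: ks) = eraseAll (d.erase k) ks := rfl

-- A's make_part loop, characterised by selKeys / eraseAll
theorem foldl_pvStep_eq (lst : List String) (d : PySem.Dict String String)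
    (res : List (String × String)) :
    lst.foldl pvStep (res, d) =
      (res ++ (selKeys d lst).map (fun k => (k, d.getD k "")),
       eraseAll d (selKeys d lst)) := by
  induction lst generalizing d res with
  | nil => simp [selKeys, eraseAll]
  | cons f fs ih =>
    cases h : d.get? f with
    | none =>
      have hc : d.contains f = false := (PySem.Dict.get?_eq_none_iff_contains d f).mp h
      have hstep : pvStep (res, d) f = (res, d) := by
        simp [pvStep, PySem.Dict.pop?, h]
      rw [List.foldl_cons, hstep, ih, selKeys, if_neg (by simp [hc])]
    | some v =>
      have hc : d.contains f = true := by
        cases hcc : d.contains f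
        · have := (PySem.Dict.get?_eq_none_iff_contains d f).mpr hcc
          rw [h] at this; cases this
        · rfl
      have hv : v = d.getD f "" := by
        rw [PySem.Dict.getD_eq_get?_getD, h]; rfl
      have hstep : pvStep (res, d) f = (res ++ [(f, v)], d.erase f) := by
        simp [pvStep, PySem.Dict.pop?, h]
      rw [List.foldl_cons, hstep, ih, selKeys, if_pos hc, eraseAll_cons]
      have hmap : (selKeys (d.erase f) fs).map (fun k => (k, (d.erase f).getD k "")) =
          (selKeys (d.erase f) fs).map (fun k => (k, d.getD k "")) := by
        apply List.map_congr_left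
        intro k hk
        have hck := mem_selKeys_contains _ _ _ hk
        rw [contains_erase] at hck
        have hne : k ≠ f := by
          intro he
          rw [he] at hck
          simp at hck
        rw [getD_erase_of_ne _ _ _ hne]
      rw [hmap]
      simp [hv]

theorem selKeys_eq_dedup_filter (lst : List String) (d : PySem.Dict String String) :
    selKeys d lst = (PySem.List.dedup lst).filter (fun f => d.contains f) := by
  induction lst generalizing d with
  | nil => rfl
  | cons f fs ih =>
    have hded : PySem.List.dedup (f :: fs) =
        f :: (PySem.List.dedup fs).filter (fun y => !(y == f)) := by
      simp [PySem.List.dedup, PySem.Set.ofList_cons, PySem.Set.discard]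
    rw [hded]
    by_cases hc : d.contains f = true
    · rw [selKeys, if_pos hc, List.filter_cons, if_pos (by simpa using hc), ih,
          List.filter_filter]
      have hcg : ∀ y ∈ PySem.List.dedup fs,
          ((d.erase f).contains y) = (d.contains y && !(y == f)) := by
        intro y _
        exact contains_erase d f y
      rw [List.filter_congr hcg]
    · rw [selKeys, if_neg hc, List.filter_cons,
          if_neg (by simp_all), ih, List.filter_filter]
      apply List.filter_congr
      intro y _
      by_cases h : y = f
      · have hb : d.contains y = false := by
          rw [h]; exact Bool.eq_false_iff.mpr hc
        simp [hb]
      · have hb : (y == f) = false := by simpa using h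
        simp [hb]

theorem contains_eq_decide_mem (l : List String) (x : String) :
    l.contains x = decide (x ∈ l) := by
  by_cases h : x ∈ l <;> simp [h]

theorem set_contains_eq_list_contains (s : List String) (x : String) :
    PySem.Set.contains (PySem.Set.ofList s) x = s.contains x := by
  simp only [PySem.Set.contains, contains_eq_decide_mem]
  simp [PySem.Set.mem_ofList]

theorem set_update_contains (s t : List String) (x : String) :
    PySem.Set.contains (PySem.Set.update (PySem.Set.ofList s) t) x = (s.contains x || t.contains x) := by
  simp only [PySem.Set.contains, contains_eq_decide_mem]
  simp [PySem.Set.mem_update, PySem.Set.mem_ofList, Bool.decide_or]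

-- ===== VERDICT (by name: the statement is the Claim_ definition above) =====
theorem reorder_data_spec : Claim_equal_reorder_data := by
  intro items of ol _
  unfold Spec_reorder_data reorder_data reorder_data_alt
  dsimp only
  set d := PySem.Dict.ofList items with hd
  have hnd : d.keys.Nodup := PySem.Dict.nodup_keys_ofList items
  rw [pvMakePart_eq_foldl, foldl_pvStep_eq]
  set K1 := selKeys d of with hK1
  set d1 := eraseAll d K1 with hd1
  rw [pvMakePart_eq_foldl, foldl_pvStep_eq]
  set K2 := selKeys d1 ol with hK2
  set F := (PySem.List.dedup of).filter (fun f => d.contains f) with hF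
  have hKF : K1 = F := selKeys_eq_dedup_filter of d
  set L := (PySem.List.dedup ol).filter
      (fun f => d.contains f && !(PySem.Set.contains (PySem.Set.ofList F) f)) with hL
  have hKL : K2 = L := by
    rw [hK2, selKeys_eq_dedup_filter, hL]
    apply List.filter_congr
    intro y _
    rw [hd1, contains_eraseAll, set_contains_eq_list_contains, hKF]
  -- values in the last part come from the original dict
  have hmapL : K2.map (fun k => (k, d1.getD k "")) = K2.map (fun k => (k, d.getD k "")) := by
    apply List.map_congr_left
    intro k hk
    have hck := mem_selKeys_contains _ _ _ hk
    rw [hd1, contains_eraseAll] at hck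
    have hnm : k ∉ K1 := by
      intro hm
      rw [List.contains_iff_mem.mpr hm] at hck
      simp at hck
    rw [hd1, getD_eraseAll_of_not_mem _ _ _ hnm]
  -- the middle: items left after all pops = keys not taken, mapped
  have hmid : (eraseAll d1 K2).items =
      (d.keys.filter (fun k =>
        !(PySem.Set.contains (PySem.Set.update (PySem.Set.ofList F) L) k))).map
        (fun k => (k, d.getD k "")) := by
    rw [hd1]
    show (eraseAll (eraseAll d K1) K2).items = _
    have hEE : eraseAll (eraseAll d K1) K2 = eraseAll d (K1 ++ K2) := by
      simp [eraseAll, List.foldl_append]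
    rw [hEE, items_eraseAll, PySem.Dict.items_eq_map_keys d hnd "", List.filter_map]
    congr 1
    apply List.filter_congr
    intro k _
    simp only [Function.comp_apply]
    rw [set_update_contains, hKF, hKL]
    by_cases h1 : k ∈ F <;> by_cases h2 : k ∈ L <;> simp [h1, h2]
  simp only [List.nil_append]
  rw [hmapL, hmid, hKF, hKL, List.map_append, List.map_append]
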